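-- pv_equiv track=rewrite | github.com/thepradip/micoracle | hands_free_voice.py | looks_hallucinated
-- ===== SOURCE A (Python) =====
-- def looks_hallucinated(text: str) -> bool:
--     words = text.lower().split()
--     if len(words) < 9:
--         return False
--     for size in (3, 4, 5, 6):
--         if len(words) < size * 3:
--             continue
--         for i in range(len(words) - size * 3 + 1):
--             chunk = words[i:i + size]
--             if (words[i + size:i + 2 * size] == chunk
--                     and words[i + 2 * size:i + 3 * size] == chunk):
--                 return True
--     return False
-- ===== SOURCE B (Python) =====
-- def looks_hallucinated(text: str) -> bool:
--     words = text.lower().split()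
--     n = len(words)
--     if n < 9:
--         return False
--     for size in (3, 4, 5, 6):
--         streak = 0
--         for j in range(n - size):
--             if words[j] == words[j + size]:
--                 streak += 1
--                 if streak >= 2 * size:
--                     return True
--             else:
--                 streak = 0
--     return False
-- ===== Notes on version B (the rewrite author's own statement) =====
-- stated objective: alternative
-- what changed: Replaces the per-offset triple-slice comparison with a single streak counter per chunk size: one pass counting consecutive positions where words[j]==words[j+size]; a streak of 2*size proves a chunk repeated three times, so no list slices are built or compared.
import Mathlib
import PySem

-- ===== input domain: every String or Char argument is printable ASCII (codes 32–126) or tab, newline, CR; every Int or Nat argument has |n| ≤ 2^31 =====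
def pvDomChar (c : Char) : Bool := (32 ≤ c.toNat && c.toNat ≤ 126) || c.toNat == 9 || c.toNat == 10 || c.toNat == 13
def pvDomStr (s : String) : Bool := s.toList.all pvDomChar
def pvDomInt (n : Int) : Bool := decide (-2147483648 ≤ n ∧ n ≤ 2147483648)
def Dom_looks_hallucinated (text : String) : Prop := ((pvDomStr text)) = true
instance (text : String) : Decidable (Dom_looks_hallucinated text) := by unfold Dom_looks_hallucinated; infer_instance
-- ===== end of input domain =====

-- B replaces A's triple-slice comparison at every offset by a single streak counter per
-- chunk size (a run of 2*size consecutive positions with words[j]==words[j+size]);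
-- objective: alternative (same value on every input, no slices built).

-- ===== PORT A =====
-- inner loops of A: 'for i in range(len(words) - size*3 + 1)' with early 'return True' is List.any;
-- the 'if len(words) < size*3: continue' guard is the leading if.
def lhA_inner (ws : List String) (size : Nat) : Bool :=
  if ws.length < size * 3 then false
  else
    (List.range (ws.length - size * 3 + 1)).any (fun i =>
      let chunk := PySem.List.slice ws (some (i : Int)) (some ((i + size : Nat) : Int))
      (PySem.List.slice ws (some ((i + size : Nat) : Int)) (some ((i + 2 * size : Nat) : Int)) == chunk)
        && (PySem.List.slice ws (some ((i + 2 * size : Nat) : Int)) (some ((i + 3 * size : Nat) : Int)) == chunk))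

def looks_hallucinated (text : String) : Bool :=
  let words := PySem.Str.split₀ (PySem.Str.lower text)
  if words.length < 9 then false
  else [3, 4, 5, 6].any (fun size => lhA_inner words size)

-- ===== PORT B =====
-- one step of B's inner loop; getD is exact here: B only indexes words[j], words[j+size]
-- with j < n - size, both in range.
def lhB_step (ws : List String) (size : Nat) (st : Bool × Nat) (j : Nat) : Bool × Nat :=
  if st.1 then st
  else if ws.getD j "" == ws.getD (j + size) "" then
    (decide (2 * size ≤ st.2 + 1), st.2 + 1)
  else (false, 0)

-- 'for j in range(n - size)' with the streak accumulator; early 'return True' is the frozen flag.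
def lhB_inner (ws : List String) (size : Nat) : Bool :=
  ((List.range (ws.length - size)).foldl (lhB_step ws size) (false, 0)).1

def looks_hallucinated_alt (text : String) : Bool :=
  let words := PySem.Str.split₀ (PySem.Str.lower text)
  if words.length < 9 then false
  else [3, 4, 5, 6].any (fun size => lhB_inner words size)

-- ===== PRECONDITION & SPEC =====
def Spec_looks_hallucinated (text : String) (out : Bool) : Prop := out = looks_hallucinated_alt text
instance (text : String) (out : Bool) : Decidable (Spec_looks_hallucinated text out) := by unfold Spec_looks_hallucinated; infer_instance

-- ===== CLAIM (what is proved, stated in full; the proofs are below) =====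
def Claim_equal_looks_hallucinated : Prop := ∀ (text : String), Dom_looks_hallucinated text → Spec_looks_hallucinated text (looks_hallucinated text)

-- ===== LEMMAS AND PROOFS =====

-- the common characterisation: some window of 2*size shifted-equal positions exists
def lhP (ws : List String) (s : Nat) : Prop :=
  ∃ i, i + 3 * s ≤ ws.length ∧ ∀ k < 2 * s, ws.getD (i + k) "" = ws.getD (i + k + s) ""

lemma take_drop_eq_iff (ws : List String) (a b s : Nat)
    (ha : a + s ≤ ws.length) (hb : b + s ≤ ws.length) :
    ((ws.drop a).take s = (ws.drop b).take s) ↔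
      ∀ k < s, ws.getD (a + k) "" = ws.getD (b + k) "" := by
  constructor
  · intro h k hk
    have h2 := congrArg (fun l => l[k]?) h
    simp only [List.getElem?_take_of_lt hk, List.getElem?_drop] at h2
    simp only [List.getD_eq_getElem?_getD, h2]
  · intro h
    apply List.ext_getElem?
    intro k
    by_cases hk : k < s
    · simp only [List.getElem?_take_of_lt hk, List.getElem?_drop]
      have h3 := h k hk
      have ha1 : a + k < ws.length := by omega
      have hb1 : b + k < ws.length := by omega
      simp only [List.getD_eq_getElem?_getD, List.getElem?_eq_getElem ha1,
        List.getElem?_eq_getElem hb1, Option.getD_some] at h3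
      rw [List.getElem?_eq_getElem ha1, List.getElem?_eq_getElem hb1, h3]
    · rw [List.getElem?_eq_none (by simp [List.length_take]; omega),
        List.getElem?_eq_none (by simp [List.length_take]; omega)]

lemma window_iff (ws : List String) (s i : Nat) (h : i + 3 * s ≤ ws.length) :
    ((ws.drop (i + s)).take s = (ws.drop i).take s ∧
     (ws.drop (i + 2 * s)).take s = (ws.drop i).take s)
      ↔ ∀ k < 2 * s, ws.getD (i + k) "" = ws.getD (i + k + s) "" := by
  rw [take_drop_eq_iff ws (i + s) i s (by omega) (by omega),
      take_drop_eq_iff ws (i + 2 * s) i s (by omega) (by omega)]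
  constructor
  · rintro ⟨h1, h2⟩ k hk
    by_cases hks : k < s
    · have e := h1 k hks
      rw [show i + k + s = i + s + k by omega]
      exact e.symm
    · have e1 := h1 (k - s) (by omega)
      have e2 := h2 (k - s) (by omega)
      rw [show i + k = i + s + (k - s) by omega, e1,
        show i + s + (k - s) + s = i + 2 * s + (k - s) by omega, e2]
  · intro h
    refine ⟨fun k hk => ?_, fun k hk => ?_⟩
    · have e := h k (by omega)
      rw [show i + s + k = i + k + s by omega]
      exact e.symm
    · have e1 := h k (by omega)
      have e2 := h (s + k) (by omega)
      rw [show i + 2 * s + k = i + (s + k) + s by omega, ← e2,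
        show i + (s + k) = i + k + s by omega, ← e1]

lemma lhA_char (ws : List String) (s : Nat) (hs : 0 < s) :
    lhA_inner ws s = true ↔ lhP ws s := by
  unfold lhA_inner
  by_cases hn : ws.length < s * 3
  · simp only [if_pos hn, Bool.false_eq_true, false_iff]
    rintro ⟨i, hi, -⟩
    omega
  · simp only [if_neg hn, List.any_eq_true, List.mem_range]
    constructor
    · rintro ⟨i, hi, hp⟩
      have h3 : i + 3 * s ≤ ws.length := by omega
      simp only [PySem.List.slice_natCast, Bool.and_eq_true, beq_iff_eq] at hp
      rw [show i + s - i = s from by omega, show i + 2 * s - (i + s) = s from by omega,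
        show i + 3 * s - (i + 2 * s) = s from by omega] at hp
      exact ⟨i, h3, (window_iff ws s i h3).mp hp⟩
    · rintro ⟨i, h3, hw⟩
      refine ⟨i, by omega, ?_⟩
      simp only [PySem.List.slice_natCast, Bool.and_eq_true, beq_iff_eq]
      rw [show i + s - i = s from by omega, show i + 2 * s - (i + s) = s from by omega,
        show i + 3 * s - (i + 2 * s) = s from by omega]
      exact (window_iff ws s i h3).mpr hw

-- B-side: the streak value after j steps (when the flag is still false)
def lhRun (ws : List String) (s : Nat) : Nat → Nat
  | 0 => 0
  | j+1 => if ws.getD j "" = ws.getD (j + s) "" then lhRun ws s j + 1 else 0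

def lhF (ws : List String) (s j : Nat) : Prop :=
  ∃ i, i + 2 * s ≤ j ∧ ∀ k < 2 * s, ws.getD (i + k) "" = ws.getD (i + k + s) ""

lemma lhRun_le (ws : List String) (s : Nat) : ∀ j, lhRun ws s j ≤ j := by
  intro j
  induction j with
  | zero => simp [lhRun]
  | succ j ih =>
    simp only [lhRun]
    split <;> omega

lemma lhRun_spec (ws : List String) (s : Nat) : ∀ j t, t ≤ lhRun ws s j ↔
    (t ≤ j ∧ ∀ k < t, ws.getD (j - t + k) "" = ws.getD (j - t + k + s) "") := by
  intro j
  induction j with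
  | zero =>
    intro t
    simp only [lhRun]
    constructor
    · intro h
      exact ⟨h, fun k hk => by omega⟩
    · rintro ⟨h1, -⟩
      exact h1
  | succ j ih =>
    intro t
    by_cases hg : ws.getD j "" = ws.getD (j + s) ""
    · simp only [lhRun, if_pos hg]
      constructor
      · intro ht
        rcases Nat.eq_zero_or_pos t with h0 | h0
        · subst h0
          exact ⟨by omega, fun k hk => by omega⟩
        · obtain ⟨hle, hall⟩ := (ih (t - 1)).mp (by omega)
          refine ⟨by omega, ?_⟩
          intro k hk
          by_cases hkt : k < t - 1
          · have e := hall k hkt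
            rw [show j + 1 - t + k = j - (t - 1) + k from by omega]
            exact e
          · rw [show j + 1 - t + k = j from by omega]
            exact hg
      · rintro ⟨hle, hall⟩
        rcases Nat.eq_zero_or_pos t with h0 | h0
        · omega
        · have h2 : t - 1 ≤ lhRun ws s j := (ih (t - 1)).mpr ⟨by omega, by
            intro k hk
            have e := hall k (by omega)
            rw [show j + 1 - t + k = j - (t - 1) + k from by omega] at e
            exact e⟩
          omega
    · simp only [lhRun, if_neg hg]
      constructor
      · intro ht
        have h0 : t = 0 := by omega
        subst h0
        exact ⟨by omega, fun k hk => by omega⟩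
      · rintro ⟨hle, hall⟩
        by_contra hc
        have h0 : 0 < t := by omega
        have e := hall (t - 1) (by omega)
        rw [show j + 1 - t + (t - 1) = j from by omega] at e
        exact hg e

lemma lhB_inv (ws : List String) (s : Nat) (hs : 0 < s) : ∀ j,
    ((List.range j).foldl (lhB_step ws s) (false, 0) = (true, 2 * s) ∧ lhF ws s j) ∨
    ((List.range j).foldl (lhB_step ws s) (false, 0) = (false, lhRun ws s j) ∧ ¬ lhF ws s j) := by
  intro j
  induction j with
  | zero =>
    right
    refine ⟨by simp [lhRun], ?_⟩
    rintro ⟨i, hi, -⟩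
    omega
  | succ j ih =>
    rw [List.range_succ, List.foldl_append, List.foldl_cons, List.foldl_nil]
    rcases ih with ⟨hst, hF⟩ | ⟨hst, hF⟩
    · left
      rw [hst]
      refine ⟨by simp [lhB_step], ?_⟩
      obtain ⟨i, hi, h⟩ := hF
      exact ⟨i, by omega, h⟩
    · rw [hst]
      by_cases hg : ws.getD j "" = ws.getD (j + s) ""
      · by_cases hbig : 2 * s ≤ lhRun ws s j + 1
        · left
          have hrun_lt : lhRun ws s j < 2 * s := by
            by_contra hcc
            push Not at hcc
            apply hF
            obtain ⟨hle, hall⟩ := (lhRun_spec ws s j (2 * s)).mp hcc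
            exact ⟨j - 2 * s, by omega, hall⟩
          have hrun : lhRun ws s j + 1 = 2 * s := by omega
          constructor
          · have hg' : ws[j]?.getD "" = ws[j + s]?.getD "" := hg
            simp [lhB_step, hg', hrun]
          · have hj : 2 * s ≤ j + 1 := by
              have := lhRun_le ws s j
              omega
            obtain ⟨hle, hall⟩ := (lhRun_spec ws s j (2 * s - 1)).mp (by omega)
            refine ⟨j + 1 - 2 * s, by omega, ?_⟩
            intro k hk
            by_cases hk1 : k < 2 * s - 1
            · have e := hall k hk1
              rw [show j + 1 - 2 * s + k = j - (2 * s - 1) + k from by omega]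
              exact e
            · have hke : k = 2 * s - 1 := by omega
              subst hke
              rw [show j + 1 - 2 * s + (2 * s - 1) = j from by omega]
              exact hg
        · right
          constructor
          · have hg' : ws[j]?.getD "" = ws[j + s]?.getD "" := hg
            simp [lhB_step, hg', lhRun]
            omega
          · rintro ⟨i, hi, hall⟩
            rcases Nat.lt_or_ge (i + 2 * s) (j + 1) with hlt | hge
            · exact hF ⟨i, by omega, hall⟩
            · have hij : i + 2 * s = j + 1 := by omega
              apply hbig
              have h1 : 2 * s - 1 ≤ lhRun ws s j := by
                rw [lhRun_spec]
                refine ⟨by omega, ?_⟩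
                intro k hk
                have e := hall k (by omega)
                rw [show j - (2 * s - 1) + k = i + k from by omega]
                exact e
              omega
      · right
        constructor
        · have hg' : ¬ ws[j]?.getD "" = ws[j + s]?.getD "" := hg
          simp [lhB_step, hg', lhRun]
        · rintro ⟨i, hi, hall⟩
          rcases Nat.lt_or_ge (i + 2 * s) (j + 1) with hlt | hge
          · exact hF ⟨i, by omega, hall⟩
          · have hij : i + 2 * s = j + 1 := by omega
            apply hg
            have e := hall (2 * s - 1) (by omega)
            rw [show i + (2 * s - 1) = j from by omega] at e
            exact e

lemma lhB_char (ws : List String) (s : Nat) (hs : 0 < s) :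
    lhB_inner ws s = true ↔ lhP ws s := by
  unfold lhB_inner
  rcases lhB_inv ws s hs (ws.length - s) with ⟨hst, hF⟩ | ⟨hst, hF⟩
  · rw [hst]
    simp only [true_iff]
    obtain ⟨i, hi, h⟩ := hF
    exact ⟨i, by omega, h⟩
  · rw [hst]
    simp only [Bool.false_eq_true, false_iff]
    rintro ⟨i, hi, h⟩
    exact hF ⟨i, by omega, h⟩

lemma inner_eq (ws : List String) (s : Nat) (hs : 0 < s) :
    lhA_inner ws s = lhB_inner ws s := by
  rw [Bool.eq_iff_iff, lhA_char ws s hs, lhB_char ws s hs]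

-- ===== VERDICT (by name: the statement is the Claim_ definition above) =====
theorem looks_hallucinated_spec : Claim_equal_looks_hallucinated := by
  intro text _
  unfold Spec_looks_hallucinated looks_hallucinated looks_hallucinated_alt
  simp only [List.any_cons, List.any_nil,
    inner_eq _ 3 (by norm_num), inner_eq _ 4 (by norm_num),
    inner_eq _ 5 (by norm_num), inner_eq _ 6 (by norm_num)]
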